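-- pv_equiv track=rewrite | github.com/JosephLiangUBC/Chore.py | io.py | _parse_summary_pairs
-- ===== SOURCE A (Python) =====
-- from typing import Dict, List, Optional, Tuple, Union, IO
--
-- def _parse_summary_pairs(text: str) -> List[Tuple[int, int]]:
--     if not text:
--         return []
--     vals = []
--     for tok in text.split():
--         try:
--             vals.append(int(tok))
--         except ValueError:
--             continue
--     return [(vals[i], vals[i + 1]) for i in range(0, len(vals) - 1, 2)]
-- ===== SOURCE B (Python) =====
-- def _parse_summary_pairs(text):
--     if not text:
--         return []
--     result = []
--     pending = None
--     for tok in text.split():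
--         try:
--             v = int(tok)
--         except ValueError:
--             continue
--         if pending is None:
--             pending = v
--         else:
--             result.append((pending, v))
--             pending = None
--     return result
-- ===== Notes on version B (the rewrite author's own statement) =====
-- stated objective: alternative
-- what changed: B replaces A's two phases (collect every int into a vals list, then pair vals by an index-stepped comprehension) with a single pass holding one pending value and emitting each pair as soon as its partner is parsed, never building the intermediate list.
import Mathlib
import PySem

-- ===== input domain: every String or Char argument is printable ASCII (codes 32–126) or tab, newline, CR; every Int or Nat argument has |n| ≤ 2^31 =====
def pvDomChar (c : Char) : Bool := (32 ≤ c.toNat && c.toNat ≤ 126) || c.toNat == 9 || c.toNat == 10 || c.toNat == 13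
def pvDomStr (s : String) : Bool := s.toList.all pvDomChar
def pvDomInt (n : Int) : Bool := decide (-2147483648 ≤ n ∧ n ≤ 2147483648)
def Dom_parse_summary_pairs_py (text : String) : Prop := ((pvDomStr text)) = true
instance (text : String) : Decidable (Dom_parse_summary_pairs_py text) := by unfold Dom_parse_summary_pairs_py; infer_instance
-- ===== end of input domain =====

-- B replaces A's two-phase collect-then-pair by a one-pass state machine with a pending slot; same return values.
-- ===== PORT A =====
def parse_summary_pairs_py (text : String) : List (Int × Int) :=
  if text = "" then []
  else
    let vals := (PySem.Str.split₀ text).foldl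
      (fun acc tok =>
        match PySem.Int.ofStr? tok with   -- int(tok); except ValueError: continue
        | some v => acc ++ [v]
        | none => acc) []
    -- the comprehension's indices i, i+1 are always in range, so pyGetD's default is never used
    (PySem.List.pyRange 0 ((vals.length : Int) - 1) 2).map
      (fun i => (PySem.List.pyGetD vals i 0, PySem.List.pyGetD vals (i + 1) 0))

-- ===== PORT B =====
def pvAltLoop (toks : List String) (pending : Option Int) (acc : List (Int × Int)) : List (Int × Int) :=
  match toks with
  | [] => acc
  | tok :: rest =>
    match PySem.Int.ofStr? tok with
    | none => pvAltLoop rest pending acc          -- continue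
    | some v =>
      match pending with
      | none => pvAltLoop rest (some v) acc       -- store as pending
      | some p => pvAltLoop rest none (acc ++ [(p, v)])

def parse_summary_pairs_py_alt (text : String) : List (Int × Int) :=
  if text = "" then [] else pvAltLoop (PySem.Str.split₀ text) none []

-- ===== PRECONDITION & SPEC =====
def Spec_parse_summary_pairs_py (text : String) (out : List (Int × Int)) : Prop := out = parse_summary_pairs_py_alt text
instance (text : String) (out : List (Int × Int)) : Decidable (Spec_parse_summary_pairs_py text out) := by unfold Spec_parse_summary_pairs_py; infer_instance

-- ===== CLAIM (what is proved, stated in full; the proofs are below) =====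
def Claim_equal_parse_summary_pairs_py : Prop := ∀ (text : String), Dom_parse_summary_pairs_py text → Spec_parse_summary_pairs_py text (parse_summary_pairs_py text)

-- ===== LEMMAS AND PROOFS =====

-- pairUp vals = the consecutive disjoint pairs of vals, odd trailing element dropped (proof helper)
def pairUp : List Int → List (Int × Int)
  | a :: b :: rest => (a, b) :: pairUp rest
  | _ => []

theorem foldA_eq_filterMap (toks : List String) (acc : List Int) :
    toks.foldl (fun acc tok =>
      match PySem.Int.ofStr? tok with
      | some v => acc ++ [v]
      | none => acc) acc = acc ++ toks.filterMap PySem.Int.ofStr? := by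
  induction toks generalizing acc with
  | nil => simp
  | cons t rest ih =>
    simp only [List.foldl_cons, List.filterMap_cons]
    cases h : PySem.Int.ofStr? t with
    | none => simp [ih]
    | some v => simp [ih]

theorem rangeNat_eq_pairUp : ∀ (vals : List Int),
    (List.range (vals.length / 2)).map
      (fun (k : Nat) => (PySem.List.pyGetD vals ((2 * k : Nat) : Int) 0,
                 PySem.List.pyGetD vals ((2 * k + 1 : Nat) : Int) 0)) = pairUp vals
  | [] => by simp [pairUp]
  | [a] => by simp [pairUp]
  | a :: b :: rest => by
    have hlen : (a :: b :: rest).length / 2 = rest.length / 2 + 1 := by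
      simp [List.length_cons]; omega
    rw [hlen, List.range_succ_eq_map, List.map_cons, List.map_map]
    refine congrArg₂ List.cons ?_ ?_
    · simp [pairUp, PySem.List.pyGetD_ofNat', List.getD]
    · rw [← rangeNat_eq_pairUp rest]
      apply List.map_congr_left
      intro k _
      have e1 : 2 * Nat.succ k = 2 * k + 2 := by omega
      have e2 : 2 * Nat.succ k + 1 = (2 * k + 1) + 2 := by omega
      simp only [Function.comp, e1, e2, PySem.List.pyGetD_natCast]
      simp [List.getD]

theorem range_eq_pairUp (vals : List Int) :
    (PySem.List.pyRange 0 ((vals.length : Int) - 1) 2).map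
      (fun i => (PySem.List.pyGetD vals i 0, PySem.List.pyGetD vals (i + 1) 0)) = pairUp vals := by
  rw [PySem.List.pyRange_of_pos 0 ((vals.length : Int) - 1) (by norm_num), List.map_map]
  have hc : (if (0 : Int) < (vals.length : Int) - 1 then
      (((vals.length : Int) - 1 - 0 + 2 - 1) / 2).toNat else 0) = vals.length / 2 := by
    split <;> omega
  rw [hc, ← rangeNat_eq_pairUp vals]
  apply List.map_congr_left
  intro k _
  simp [Function.comp]

theorem altLoop_eq (toks : List String) :
    (∀ acc, pvAltLoop toks none acc = acc ++ pairUp (toks.filterMap PySem.Int.ofStr?)) ∧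
    (∀ acc p, pvAltLoop toks (some p) acc = acc ++ pairUp (p :: toks.filterMap PySem.Int.ofStr?)) := by
  induction toks with
  | nil => simp [pvAltLoop, pairUp]
  | cons t rest ih =>
    cases h : PySem.Int.ofStr? t with
    | none =>
      refine ⟨fun acc => ?_, fun acc p => ?_⟩ <;>
        simp [pvAltLoop, h, ih.1, ih.2]
    | some v =>
      refine ⟨fun acc => ?_, fun acc p => ?_⟩
      · simp [pvAltLoop, h, ih.2]
      · simp [pvAltLoop, h, ih.1, pairUp]

-- ===== VERDICT =====
theorem parse_summary_pairs_py_spec : Claim_equal_parse_summary_pairs_py := by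
  intro text _
  unfold Spec_parse_summary_pairs_py parse_summary_pairs_py parse_summary_pairs_py_alt
  split
  · rfl
  · rw [(altLoop_eq _).1, foldA_eq_filterMap, List.nil_append, List.nil_append,
      range_eq_pairUp]
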